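-- pv_equiv track=rewrite | github.com/ankurkrr/Data-Analysis-AI-Agents | app/tools/financial_extractor_tool.py | _is_financial_label
-- ===== SOURCE A (Python) =====
-- def _is_financial_label(text: str) -> bool:
--     """Check if text looks like a financial metric label"""
--     if not text or len(text) < 3:
--         return False
--
--     text_lower = text.lower()
--     keywords = [
--         "revenue", "profit", "income", "ebitda", "ebit",
--         "margin", "earnings", "eps", "pat", "sales"
--     ]
--
--     return any(keyword in text_lower for keyword in keywords)
-- ===== SOURCE B (Python) =====
-- def _is_financial_label(text: str) -> bool:
--     """Check if text looks like a financial metric label"""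
--     if not text or len(text) < 3:
--         return False
--
--     t = text.lower()
--     # keywords grouped by their first letter: one lookup per position
--     # instead of ten independent substring scans
--     index = {
--         "r": ["evenue"],
--         "p": ["rofit", "at"],
--         "i": ["ncome"],
--         "e": ["bitda", "bit", "arnings", "ps"],
--         "m": ["argin"],
--         "s": ["ales"],
--     }
--     for i, ch in enumerate(t):
--         if any(t.startswith(rest, i + 1) for rest in index.get(ch, [])):
--             return True
--     return False
-- ===== Notes on version B (the rewrite author's own statement) =====
-- stated objective: alternative
-- what changed: Replaced ten independent `kw in text` substring scans with a dict built once grouping keywords by first letter and a single left-to-right pass over the text that looks up the current character and tests only the matching keyword tails.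
import Mathlib
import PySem

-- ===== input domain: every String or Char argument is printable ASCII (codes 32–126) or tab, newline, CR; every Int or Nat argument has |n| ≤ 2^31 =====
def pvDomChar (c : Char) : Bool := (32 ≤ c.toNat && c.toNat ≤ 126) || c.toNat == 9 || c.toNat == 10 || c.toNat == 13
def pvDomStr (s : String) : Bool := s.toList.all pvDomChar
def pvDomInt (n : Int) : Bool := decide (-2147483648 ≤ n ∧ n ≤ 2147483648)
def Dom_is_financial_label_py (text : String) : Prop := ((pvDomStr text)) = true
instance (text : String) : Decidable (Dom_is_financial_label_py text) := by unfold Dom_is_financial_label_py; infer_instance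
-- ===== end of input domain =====

-- B groups the ten keywords by first letter in a dict built once, and makes ONE pass over the
-- lowered text, looking up the current character and testing only the matching tails (alternative).

-- ===== PORT A =====
-- A's keyword list, in source order (strings as their character lists)
def pvKeywordsA : List (List Char) :=
  [['r','e','v','e','n','u','e'], ['p','r','o','f','i','t'], ['i','n','c','o','m','e'],
   ['e','b','i','t','d','a'], ['e','b','i','t'],
   ['m','a','r','g','i','n'], ['e','a','r','n','i','n','g','s'],
   ['e','p','s'], ['p','a','t'], ['s','a','l','e','s']]

def is_financial_label_py (text : String) : Bool :=
  if text.toList = [] ∨ text.toList.length < 3 then false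
  else
    let text_lower := PySem.Chars.lower text.toList
    pvKeywordsA.any (fun keyword => PySem.Chars.isIn keyword text_lower)

-- ===== PORT B =====
-- B's dict literal: first letter ↦ list of keyword tails
def pvIndex : PySem.Dict Char (List (List Char)) :=
  PySem.Dict.ofList
    [('r', [['e','v','e','n','u','e']]),
     ('p', [['r','o','f','i','t'], ['a','t']]),
     ('i', [['n','c','o','m','e']]),
     ('e', [['b','i','t','d','a'], ['b','i','t'], ['a','r','n','i','n','g','s'], ['p','s']]),
     ('m', [['a','r','g','i','n']]),
     ('s', [['a','l','e','s']])]

-- B's `for i, ch in enumerate(t): … t.startswith(rest, i+1) …` loop, as recursion on suffixes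
def pvScanB : List Char → Bool
  | [] => false
  | ch :: rest =>
      ((pvIndex.getD ch []).any fun r => PySem.Chars.startswith rest r) || pvScanB rest

def is_financial_label_py_alt (text : String) : Bool :=
  if text.toList = [] ∨ text.toList.length < 3 then false
  else pvScanB (PySem.Chars.lower text.toList)

-- ===== PRECONDITION & SPEC =====
def Spec_is_financial_label_py (text : String) (out : Bool) : Prop := out = is_financial_label_py_alt text
instance (text : String) (out : Bool) : Decidable (Spec_is_financial_label_py text out) := by unfold Spec_is_financial_label_py; infer_instance

-- ===== CLAIM (what is proved, stated in full; the proofs are below) =====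
def Claim_equal_is_financial_label_py : Prop := ∀ (text : String), Dom_is_financial_label_py text → Spec_is_financial_label_py text (is_financial_label_py text)

-- ===== LEMMAS AND PROOFS =====

-- one step of B's scan sees exactly the keywords of A that start at this position
theorem pvIndex_step (c : Char) (tail : List Char) :
    ((pvIndex.getD c []).any fun r => PySem.Chars.startswith tail r) =
    (pvKeywordsA.any fun k => PySem.Chars.startswith (c :: tail) k) := by
  rw [Bool.eq_iff_iff]
  simp only [List.any_eq_true, PySem.Chars.startswith_iff]
  by_cases hr : c = 'r'
  · subst hr
    rw [show pvIndex.getD 'r' [] = [['e','v','e','n','u','e']] from by decide]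
    simp [pvKeywordsA, List.cons_prefix_cons]
  by_cases hp : c = 'p'
  · subst hp
    rw [show pvIndex.getD 'p' [] = [['r','o','f','i','t'], ['a','t']] from by decide]
    simp [pvKeywordsA, List.cons_prefix_cons]
  by_cases hi : c = 'i'
  · subst hi
    rw [show pvIndex.getD 'i' [] = [['n','c','o','m','e']] from by decide]
    simp [pvKeywordsA, List.cons_prefix_cons]
  by_cases he : c = 'e'
  · subst he
    rw [show pvIndex.getD 'e' [] = [['b','i','t','d','a'], ['b','i','t'], ['a','r','n','i','n','g','s'], ['p','s']] from by decide]
    simp [pvKeywordsA, List.cons_prefix_cons]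
  by_cases hm : c = 'm'
  · subst hm
    rw [show pvIndex.getD 'm' [] = [['a','r','g','i','n']] from by decide]
    simp [pvKeywordsA, List.cons_prefix_cons]
  by_cases hs : c = 's'
  · subst hs
    rw [show pvIndex.getD 's' [] = [['a','l','e','s']] from by decide]
    simp [pvKeywordsA, List.cons_prefix_cons]
  · have hd : pvIndex.getD c [] = [] := by
      rw [show pvIndex = PySem.Dict.mk
          [('r', [['e','v','e','n','u','e']]),
           ('p', [['r','o','f','i','t'], ['a','t']]),
           ('i', [['n','c','o','m','e']]),
           ('e', [['b','i','t','d','a'], ['b','i','t'], ['a','r','n','i','n','g','s'], ['p','s']]),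
           ('m', [['a','r','g','i','n']]), ('s', [['a','l','e','s']])] from by decide]
      simp [PySem.Dict.getD, PySem.Dict.get?,
        Ne.symm hr, Ne.symm hp, Ne.symm hi, Ne.symm he, Ne.symm hm, Ne.symm hs]
    rw [hd]
    simp [pvKeywordsA, List.cons_prefix_cons, Ne.symm hr, Ne.symm hp, Ne.symm hi,
      Ne.symm he, Ne.symm hm, Ne.symm hs]

-- B's scan finds exactly the keywords occurring as a prefix of some suffix of s
theorem pvScanB_iff (s : List Char) :
    pvScanB s = true ↔ ∃ k ∈ pvKeywordsA, ∃ j, k <+: s.drop j := by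
  induction s with
  | nil =>
    refine iff_of_false (by simp [pvScanB]) ?_
    rintro ⟨k, hkmem, j, hpre⟩
    have hk : ∀ k ∈ pvKeywordsA, k ≠ ([] : List Char) := by decide
    simp only [List.drop_nil] at hpre
    exact hk k hkmem (List.prefix_nil.mp hpre)
  | cons c rest ih =>
    simp only [pvScanB, Bool.or_eq_true, pvIndex_step, ih]
    constructor
    · rintro (h | ⟨k, hkmem, j, hpre⟩)
      · rcases List.any_eq_true.mp h with ⟨k, hkmem, hsw⟩
        exact ⟨k, hkmem, 0, by simpa using (PySem.Chars.startswith_iff _ _).mp hsw⟩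
      · exact ⟨k, hkmem, j + 1, by simpa using hpre⟩
    · rintro ⟨k, hkmem, j, hpre⟩
      cases j with
      | zero =>
        exact Or.inl (List.any_eq_true.mpr ⟨k, hkmem, (PySem.Chars.startswith_iff _ _).mpr (by simpa using hpre)⟩)
      | succ j => exact Or.inr ⟨k, hkmem, j, by simpa using hpre⟩

-- ===== VERDICT (by name: the statement is the Claim_ definition above) =====
theorem is_financial_label_py_spec : Claim_equal_is_financial_label_py := by
  intro text _
  unfold Spec_is_financial_label_py is_financial_label_py is_financial_label_py_alt
  split_ifs with h
  · rfl
  · rw [Bool.eq_iff_iff, pvScanB_iff]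
    show List.any _ _ = true ↔ _
    rw [List.any_eq_true]
    constructor
    · rintro ⟨k, hkmem, hin⟩
      rcases (PySem.Chars.exists_prefix_drop_iff_isIn k _).mpr hin with ⟨j, hpre⟩
      exact ⟨k, hkmem, j, hpre⟩
    · rintro ⟨k, hkmem, j, hpre⟩
      exact ⟨k, hkmem, (PySem.Chars.exists_prefix_drop_iff_isIn k _).mp ⟨j, hpre⟩⟩
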